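-- pv_equiv track=rewrite | github.com/Tetrix/Aalto-assignments | algorithmic_methods_of_data_mining/exercise2/minhash.py | get_array
-- ===== SOURCE A (Python) =====
-- def get_array(set, union):
--     array = []
--
--     for item in union:
--         elem = [elem for elem in set if elem[0] == item[0]]
--         if len(elem) != 0:
--             for i in range(item[1]):
--                 if i + 1 <= elem[0][1]:
--                     array.append(1)
--                 else:
--                     array.append(0)
--         else:
--             array.append(0)
--     return array
-- ===== SOURCE B (Python) =====
-- def get_array(set, union):
--     # Preallocate: first-match map, then total length, then a zero-filled
--     # array written in place with slice assignment at computed offsets.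
--     first = {}
--     for k, v in set:
--         if k not in first:
--             first[k] = v
--     total = 0
--     for k, c in union:
--         total += max(c, 0) if k in first else 1
--     array = [0] * total
--     pos = 0
--     for k, c in union:
--         if k in first:
--             n = max(c, 0)
--             ones = min(n, max(first[k], 0))
--             array[pos:pos + ones] = [1] * ones
--             pos += n
--         else:
--             pos += 1
--     return array
-- ===== Notes on version B (the rewrite author's own statement) =====
-- stated objective: faster
-- what changed: B is a staged preallocate-and-fill: it builds a first-match key->value map, computes the total output length, allocates a zero-filled array once, and writes each item's run of 1s in place with slice assignment at a running offset, instead of A's single append-as-you-go pass with a per-item linear scan of set and a per-position conditional loop.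
import Mathlib
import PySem

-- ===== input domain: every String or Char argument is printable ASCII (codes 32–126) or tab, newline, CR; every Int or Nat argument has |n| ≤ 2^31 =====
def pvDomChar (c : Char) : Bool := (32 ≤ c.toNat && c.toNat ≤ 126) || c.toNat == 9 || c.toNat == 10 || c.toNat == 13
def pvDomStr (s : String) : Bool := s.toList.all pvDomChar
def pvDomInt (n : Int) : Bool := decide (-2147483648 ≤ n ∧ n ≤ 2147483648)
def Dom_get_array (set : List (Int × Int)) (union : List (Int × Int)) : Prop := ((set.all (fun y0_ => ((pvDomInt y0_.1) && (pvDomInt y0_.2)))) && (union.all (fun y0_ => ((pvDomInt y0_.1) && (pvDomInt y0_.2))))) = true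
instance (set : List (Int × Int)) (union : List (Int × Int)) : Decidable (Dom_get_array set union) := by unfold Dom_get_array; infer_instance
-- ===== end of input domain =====

-- B replaces A's append-as-you-go scan (per-item linear search of set + per-position
-- conditional loop) by a three-stage preallocate-and-fill: first-match map, total
-- output length, then a zero array written in place at computed offsets (objective: faster).

-- ===== PORT A =====
-- 'elem[0]' on the (checked non-empty) filtered list is its head; headI is exact there.
def get_array (set : List (Int × Int)) (union : List (Int × Int)) : List Int :=
  union.foldl (fun array item =>
    let elem := set.filter (fun e => e.1 == item.1)
    if elem.length ≠ 0 then
      (PySem.List.pyRange 0 item.2 1).foldl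
        (fun array i => if i + 1 ≤ elem.headI.2 then array ++ [1] else array ++ [0]) array
    else array ++ [0]) []

-- ===== PORT B =====
def firstMap (set : List (Int × Int)) : PySem.Dict Int Int :=
  set.foldl (fun d kv => if d.contains kv.1 then d else d.insert kv.1 kv.2) PySem.Dict.empty

-- exact port of Python's same-length slice assignment array[pos:pos+ones] = [1]*ones
def writeOnes (arr : List Int) (pos ones : Nat) : List Int :=
  arr.take pos ++ List.replicate ones 1 ++ arr.drop (pos + ones)

def get_array_alt (set : List (Int × Int)) (union : List (Int × Int)) : List Int :=
  let first := firstMap set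
  let total := union.foldl (fun s kc =>
      s + (match first.get? kc.1 with
           | some _ => (max kc.2 0).toNat
           | none => 1)) 0
  (union.foldl (fun st kc =>
      match first.get? kc.1 with
      | some v =>
          let n := (max kc.2 0).toNat
          let ones := min n (max v 0).toNat
          (writeOnes st.1 st.2 ones, st.2 + n)
      | none => (st.1, st.2 + 1)) (List.replicate total 0, 0)).1

-- ===== PRECONDITION & SPEC =====
def Spec_get_array (set : List (Int × Int)) (union : List (Int × Int)) (out : List Int) : Prop := out = get_array_alt set union
instance (set : List (Int × Int)) (union : List (Int × Int)) (out : List Int) : Decidable (Spec_get_array set union out) := by unfold Spec_get_array; infer_instance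

-- ===== CLAIM (what is proved, stated in full; the proofs are below) =====
def Claim_equal_get_array : Prop := ∀ (set : List (Int × Int)) (union : List (Int × Int)), Dom_get_array set union → Spec_get_array set union (get_array set union)

-- ===== LEMMAS AND PROOFS =====

-- the output block one union item contributes, and its length
def pvBlock (f : PySem.Dict Int Int) (kc : Int × Int) : List Int :=
  match f.get? kc.1 with
  | some v =>
      List.replicate (min (max kc.2 0).toNat (max v 0).toNat) 1
        ++ List.replicate ((max kc.2 0).toNat - min (max kc.2 0).toNat (max v 0).toNat) 0
  | none => [0]

def pvBlen (f : PySem.Dict Int Int) (kc : Int × Int) : Nat :=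
  match f.get? kc.1 with
  | some _ => (max kc.2 0).toNat
  | none => 1

theorem pv_head?_filter {α : Type} (p : α → Bool) : ∀ (l : List α), (l.filter p).head? = l.find? p := by
  intro l
  induction l with
  | nil => rfl
  | cons a t ih =>
    by_cases h : p a = true <;> simp [h, ih]

theorem firstMap_get?_aux (k : Int) : ∀ (set : List (Int × Int)) (d : PySem.Dict Int Int),
    (set.foldl (fun d kv => if d.contains kv.1 then d else d.insert kv.1 kv.2) d).get? k
      = (d.get? k).or ((set.find? (fun e => e.1 == k)).map (·.2)) := by
  intro set
  induction set with
  | nil => intro d; simp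
  | cons ab t ih =>
    intro d
    simp only [List.foldl_cons, List.find?_cons]
    by_cases hc : d.contains ab.1 = true
    · rw [if_pos hc, ih]
      by_cases hk : ab.1 == k
      · have hk' : k = ab.1 := (beq_iff_eq.mp hk).symm
        have hs : (d.get? k).isSome := by
          rw [← PySem.Dict.contains_eq_isSome_get?]; rw [hk']; exact hc
        rcases Option.isSome_iff_exists.mp hs with ⟨w, hw⟩
        rw [hw]; simp [hk]
      · simp [hk]
    · rw [if_neg hc, ih]
      by_cases hk : ab.1 == k
      · have hk' : k = ab.1 := (beq_iff_eq.mp hk).symm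
        have h2 : (d.get? ab.1).isSome = false := by
          rw [← PySem.Dict.contains_eq_isSome_get?]; simpa using hc
        have hnone : d.get? k = none := by
          rw [hk']; exact Option.not_isSome_iff_eq_none.mp (by simp [h2])
        rw [hk', PySem.Dict.get?_insert_self]
        simp [← hk', hnone]
      · have hne : k ≠ ab.1 := fun h => hk (by simp [h])
        rw [PySem.Dict.get?_insert_of_ne _ _ hne]
        simp [hk]

theorem firstMap_get? (set : List (Int × Int)) (k : Int) :
    (firstMap set).get? k = (set.find? (fun e => e.1 == k)).map (·.2) := by
  unfold firstMap
  rw [firstMap_get?_aux]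
  simp

theorem foldl_push {α β : Type} (f : β → α) : ∀ (l : List β) (arr : List α),
    l.foldl (fun a x => a ++ [f x]) arr = arr ++ l.map f := by
  intro l
  induction l with
  | nil => simp
  | cons a t ih => intro arr; simp [ih]

theorem inner_loop_eq (v c : Int) (arr : List Int) :
    (PySem.List.pyRange 0 c 1).foldl
        (fun array i => if i + 1 ≤ v then array ++ [1] else array ++ [0]) arr
      = arr ++ (List.replicate (min (max c 0).toNat (max v 0).toNat) 1
          ++ List.replicate ((max c 0).toNat - min (max c 0).toNat (max v 0).toNat) 0) := by
  have hf : (fun (array : List Int) (i : Int) => if i + 1 ≤ v then array ++ [1] else array ++ [0])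
      = (fun array i => array ++ [if i + 1 ≤ v then (1 : Int) else 0]) := by
    funext a i; split <;> rfl
  rw [hf, foldl_push, PySem.List.pyRange_one]
  congr 1
  rw [List.map_map]
  apply List.ext_getElem
  · simp; omega
  · intro i h1 h2
    simp only [List.getElem_map, List.getElem_range, Function.comp]
    rw [List.getElem_append]
    simp only [List.length_map, List.length_range] at h1
    split <;> simp only [List.getElem_replicate] <;> split <;> simp_all <;> omega

theorem step_eq (set : List (Int × Int)) (arr : List Int) (item : Int × Int) :
    (let elem := set.filter (fun e => e.1 == item.1)
     if elem.length ≠ 0 then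
       (PySem.List.pyRange 0 item.2 1).foldl
         (fun array i => if i + 1 ≤ elem.headI.2 then array ++ [1] else array ++ [0]) arr
     else arr ++ [0])
    = arr ++ pvBlock (firstMap set) item := by
  unfold pvBlock
  rw [firstMap_get?]
  cases hfd : set.find? (fun e => e.1 == item.1) with
  | none =>
    have hfil : set.filter (fun e => e.1 == item.1) = [] := by
      rw [List.filter_eq_nil_iff]
      intro a ha
      exact (List.find?_eq_none.mp hfd) a ha
    simp [hfil]
  | some e =>
    have hh : (set.filter (fun e => e.1 == item.1)).head? = some e := by
      rw [pv_head?_filter, hfd]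
    cases hfil : set.filter (fun e => e.1 == item.1) with
    | nil => rw [hfil] at hh; simp at hh
    | cons x t =>
      rw [hfil] at hh
      simp only [List.head?_cons, Option.some.injEq] at hh
      subst hh
      simp only [List.headI, List.length_cons, Option.map_some]
      rw [if_pos (by simp)]
      exact inner_loop_eq x.2 item.2 arr

theorem foldl_append_blocks {α β : Type} (g : β → List α) : ∀ (l : List β) (arr : List α),
    l.foldl (fun a x => a ++ g x) arr = arr ++ l.flatMap g := by
  intro l
  induction l with
  | nil => simp
  | cons a t ih => intro arr; simp [ih]

theorem get_array_eq_flatMap (set union : List (Int × Int)) :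
    get_array set union = union.flatMap (pvBlock (firstMap set)) := by
  have h : get_array set union = union.foldl (fun arr item => arr ++ pvBlock (firstMap set) item) [] :=
    List.foldl_ext _ _ [] (fun arr item _ => step_eq set arr item)
  rw [h, foldl_append_blocks]
  simp

theorem foldl_blen (f : PySem.Dict Int Int) : ∀ (l : List (Int × Int)) (a : Nat),
    l.foldl (fun s kc =>
      s + (match f.get? kc.1 with
           | some _ => (max kc.2 0).toNat
           | none => 1)) a = a + (l.map (pvBlen f)).sum := by
  intro l
  induction l with
  | nil => simp
  | cons kc t ih => intro a; simp [ih, pvBlen]; omega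

theorem fill_invariant (f : PySem.Dict Int Int) : ∀ (l : List (Int × Int)) (P : List Int),
    (l.foldl (fun st kc =>
        match f.get? kc.1 with
        | some v =>
            let n := (max kc.2 0).toNat
            let ones := min n (max v 0).toNat
            (writeOnes st.1 st.2 ones, st.2 + n)
        | none => (st.1, st.2 + 1))
      (P ++ List.replicate ((l.map (pvBlen f)).sum) 0, P.length)).1
    = P ++ l.flatMap (pvBlock f) := by
  intro l
  induction l with
  | nil => simp
  | cons kc t ih =>
    intro P
    simp only [List.map_cons, List.sum_cons, List.flatMap_cons]
    cases hf : f.get? kc.1 with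
    | none =>
      have hb : pvBlen f kc = 1 := by unfold pvBlen; rw [hf]
      have hbl : pvBlock f kc = [0] := by unfold pvBlock; rw [hf]
      rw [hb, hbl]
      have h1 : P ++ List.replicate (1 + (t.map (pvBlen f)).sum) 0
          = (P ++ [0]) ++ List.replicate ((t.map (pvBlen f)).sum) 0 := by
        rw [List.replicate_add]; simp
      have h2 : P.length + 1 = (P ++ [0]).length := by simp
      simp only [List.foldl_cons, hf, h1, h2, ih (P ++ [0])]
      simp
    | some v =>
      have hb : pvBlen f kc = (max kc.2 0).toNat := by unfold pvBlen; rw [hf]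
      have hbl : pvBlock f kc
          = List.replicate (min (max kc.2 0).toNat (max v 0).toNat) 1
            ++ List.replicate ((max kc.2 0).toNat - min (max kc.2 0).toNat (max v 0).toNat) 0 := by
        unfold pvBlock; rw [hf]
      have hw : writeOnes (P ++ List.replicate ((max kc.2 0).toNat + (t.map (pvBlen f)).sum) 0)
            P.length (min (max kc.2 0).toNat (max v 0).toNat)
          = (P ++ pvBlock f kc) ++ List.replicate ((t.map (pvBlen f)).sum) 0 := by
        unfold writeOnes
        rw [List.take_left, List.drop_length_add_append]
        rw [show List.replicate ((max kc.2 0).toNat + (t.map (pvBlen f)).sum) (0:Int)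
              = List.replicate (min (max kc.2 0).toNat (max v 0).toNat) (0:Int)
                ++ (List.replicate ((max kc.2 0).toNat - min (max kc.2 0).toNat (max v 0).toNat) 0
                    ++ List.replicate ((t.map (pvBlen f)).sum) 0) from by
          rw [← List.replicate_add, ← List.replicate_add]; congr 1; omega]
        rw [List.drop_append_of_le_length (by simp)]
        simp [hbl]
      have hp : P.length + (max kc.2 0).toNat = (P ++ pvBlock f kc).length := by
        simp [hbl]
      rw [hb]
      simp only [List.foldl_cons, hf]
      rw [hw, hp, ih]
      simp

theorem get_array_alt_eq_flatMap (set union : List (Int × Int)) :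
    get_array_alt set union = union.flatMap (pvBlock (firstMap set)) := by
  simp only [get_array_alt]
  rw [foldl_blen]
  have := fill_invariant (firstMap set) union []
  simpa using this

-- ===== VERDICT (by name: the statement is the Claim_ definition above) =====
theorem get_array_spec : Claim_equal_get_array := by
  intro set union _
  unfold Spec_get_array
  rw [get_array_eq_flatMap, get_array_alt_eq_flatMap]
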